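-- pv_equiv track=rewrite | github.com/WillYeadon/coding-practice | leetcode/py/49-group-anagrams.py | counter
-- ===== SOURCE A (Python) =====
-- def counter(s):
--     ans = {}
--     for i in s:
--         if i not in ans:
--             ans[i] = 1
--         else:
--             ans[i] += 1
--     output = ''
--     sorted_ans = {k: ans[k] for k in sorted(ans.keys())}
--     for key in sorted_ans.keys():
--         output += str(key)
--         output += str(sorted_ans[key])
--     return output
-- ===== SOURCE B (Python) =====
-- def counter(s):
--     t = sorted(s)
--     parts = []
--     i, n = 0, len(t)
--     while i < n:
--         j = i + 1
--         while j < n and t[j] == t[i]: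
--             j += 1
--         parts.append(t[i] + str(j - i))
--         i = j
--     return ''.join(parts)
-- ===== Notes on version B (the rewrite author's own statement) =====
-- stated objective: alternative
-- what changed: Replaced A's dict-based counting followed by sorting the distinct keys and rebuilding a dict with a single sort of all characters followed by one linear scan that emits each maximal run as the character and its run length.
import Mathlib
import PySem

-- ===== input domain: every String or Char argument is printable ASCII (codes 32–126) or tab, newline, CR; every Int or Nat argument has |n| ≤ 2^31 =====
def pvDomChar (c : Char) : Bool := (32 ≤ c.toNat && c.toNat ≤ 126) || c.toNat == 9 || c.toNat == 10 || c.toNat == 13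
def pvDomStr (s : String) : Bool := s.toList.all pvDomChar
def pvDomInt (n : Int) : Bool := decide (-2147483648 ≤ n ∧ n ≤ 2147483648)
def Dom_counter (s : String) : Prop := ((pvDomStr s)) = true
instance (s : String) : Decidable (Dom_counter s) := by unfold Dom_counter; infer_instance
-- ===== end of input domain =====

-- B replaces A's "count in a dict, then sort the distinct keys" by "sort all characters, then
-- emit consecutive runs in one scan" (alternative algorithm, same result).

-- ===== PORT A =====
def counter (s : String) : String :=
  let ans : PySem.Dict Char Int :=
    s.toList.foldl (fun d i =>
      if d.contains i = false then d.insert i 1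
      else d.insert i (d.getD i 0 + 1)) PySem.Dict.empty
  let sorted_ans : PySem.Dict Char Int :=
    (PySem.List.sorted ans.keys (fun k => k)).foldl
      (fun d k => d.insert k (ans.getD k 0)) PySem.Dict.empty  -- ans[k]: k is always a key of ans
  sorted_ans.keys.foldl
    (fun output key => (output ++ String.ofList [key]) ++ PySem.Int.toStr (sorted_ans.getD key 0)) ""

-- ===== PORT B =====
-- the outer while-loop of Source B: each step consumes one maximal run t[i..j) of equal characters
def counterRuns : List Char → List String
  | [] => []
  | c :: rest =>
      (String.ofList [c] ++ PySem.Int.toStr (1 + ((rest.takeWhile (· == c)).length : Int)))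
        :: counterRuns (rest.dropWhile (· == c))
  termination_by m => m.length
  decreasing_by
    simp only [List.length_cons]
    exact Nat.lt_succ_of_le (List.length_dropWhile_le _ _)

def counter_alt (s : String) : String :=
  PySem.Str.join "" (counterRuns (PySem.List.sorted s.toList (fun c => c)))

-- ===== PRECONDITION & SPEC =====
def Spec_counter (s : String) (out : String) : Prop := out = counter_alt s
instance (s : String) (out : String) : Decidable (Spec_counter s out) := by unfold Spec_counter; infer_instance

-- ===== CLAIM (what is proved, stated in full; the proofs are below) =====
def Claim_equal_counter : Prop := ∀ (s : String), Dom_counter s → Spec_counter s (counter s)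

-- ===== LEMMAS AND PROOFS =====

-- A's counting loop is collections.Counter
lemma pv_fold_eq_counter (l : List Char) :
    l.foldl (fun d i =>
      if d.contains i = false then d.insert i 1
      else d.insert i (d.getD i 0 + 1)) PySem.Dict.empty = PySem.Dict.counter l := by
  rw [← PySem.Dict.foldl_insert_getD_add_one_eq_counter]
  apply PySem.List.foldl_congr_mem
  intro d i _
  by_cases h : d.contains i = false
  · rw [if_pos h, PySem.Dict.getD_of_not_contains d (0 : Int) h]; norm_num
  · rw [if_neg h]

-- set(xs) (first occurrences) is a sublist of xs
lemma pv_ofList_sublist (m : List Char) : (PySem.Set.ofList m).Sublist m := by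
  induction m with
  | nil => simp [PySem.Set.ofList]
  | cons x xs ih =>
      rw [PySem.Set.ofList_cons]
      refine List.Sublist.cons₂ x (List.Sublist.trans ?_ ih)
      simp only [PySem.Set.discard]
      exact List.filter_sublist

lemma pv_ofList_pairwise_lt (m : List Char) (h : m.Pairwise (· ≤ ·)) :
    (PySem.Set.ofList m).Pairwise (· < ·) := by
  have hle : (PySem.Set.ofList m).Pairwise (· ≤ ·) := h.sublist (pv_ofList_sublist m)
  have hne : (PySem.Set.ofList m).Pairwise (· ≠ ·) := PySem.Set.nodup_ofList m
  exact (hle.and hne).imp (fun h => lt_of_le_of_ne h.1 h.2)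

-- sorting the distinct elements = the distinct elements of the sorted list
lemma pv_sorted_ofList (l : List Char) :
    PySem.List.sorted (PySem.Set.ofList l) (fun k => k)
      = PySem.Set.ofList (PySem.List.sorted l (fun c => c)) := by
  apply PySem.List.sorted_eq_of_perm_of_pairwise_lt
  · rw [List.perm_ext_iff_of_nodup (PySem.Set.nodup_ofList _) (PySem.Set.nodup_ofList _)]
    intro a
    simp [PySem.Set.mem_ofList, PySem.List.mem_sorted]
  · exact pv_ofList_pairwise_lt _ (PySem.List.sorted_pairwise l (fun c => c))

lemma pv_discard_all (c : Char) (tk : List Char) (htk : ∀ x ∈ tk, x = c) :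
    PySem.Set.discard (PySem.Set.ofList tk) c = [] := by
  simp only [PySem.Set.discard]
  rw [List.filter_eq_nil_iff]
  intro a ha
  have ha' : a ∈ tk := by simpa only [PySem.Set.mem_ofList] using ha
  simp [htk a ha']

lemma pv_ofList_run (c : Char) (tk dr : List Char)
    (htk : ∀ x ∈ tk, x = c) (hdr : c ∉ dr) :
    PySem.Set.ofList (c :: (tk ++ dr)) = c :: PySem.Set.ofList dr := by
  rw [PySem.Set.ofList_cons, PySem.Set.ofList_append, PySem.Set.update_eq_append_filter]
  congr 1
  simp only [PySem.Set.discard, List.filter_append]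
  rw [show List.filter (fun y => !y == c) (PySem.Set.ofList tk) = [] from pv_discard_all c tk htk]
  rw [List.nil_append, List.filter_filter, List.filter_eq_self]
  intro a ha
  have ha' : a ∈ dr := by simpa only [PySem.Set.mem_ofList] using ha
  have hac : a ≠ c := by intro h; exact hdr (h ▸ ha')
  rcases h : PySem.Set.contains (PySem.Set.ofList tk) a with _ | _
  · simp [hac]
  · have h1 := (PySem.Set.contains_iff _ _).1 h
    have h2 : a ∈ tk := by simpa only [PySem.Set.mem_ofList] using h1
    exact absurd (htk a h2) hac

-- on a weakly sorted list, c does not reappear after its run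
lemma pv_not_mem_dropWhile (c : Char) (rest : List Char)
    (hprest : rest.Pairwise (· ≤ ·)) (hcle : ∀ x ∈ rest, c ≤ x) :
    c ∉ rest.dropWhile (· == c) := by
  intro hcdr
  cases hdrne' : rest.dropWhile (· == c) with
  | nil => rw [hdrne'] at hcdr; simp at hcdr
  | cons d0 dr' =>
    have hdrne : rest.dropWhile (· == c) ≠ [] := by rw [hdrne']; simp
    have hhead := List.head_dropWhile_not (· == c) hdrne
    have hd0 : (rest.dropWhile (· == c)).head hdrne = d0 := by
      simp only [hdrne', List.head_cons]
    rw [hd0] at hhead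
    have hd0ne : d0 ≠ c := by simpa using hhead
    have hd0mem : d0 ∈ rest := (List.dropWhile_sublist _).subset (by
      rw [hdrne']; exact List.mem_cons_self)
    have hd0lt : c < d0 := lt_of_le_of_ne (hcle d0 hd0mem) (Ne.symm hd0ne)
    have hpdr' : (d0 :: dr').Pairwise (· ≤ ·) := by
      rw [← hdrne']; exact hprest.sublist (List.dropWhile_sublist _)
    rw [hdrne'] at hcdr
    rcases List.mem_cons.1 hcdr with h | h
    · exact hd0ne h.symm
    · exact absurd ((List.pairwise_cons.1 hpdr').1 c h) (not_le.2 hd0lt)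

-- the run scan over a weakly sorted list produces "char ++ its multiplicity" per distinct char
lemma pv_counterRuns_sorted : ∀ (n : Nat) (m : List Char), m.length ≤ n → m.Pairwise (· ≤ ·) →
    counterRuns m
      = (PySem.Set.ofList m).map (fun c => String.ofList [c] ++ PySem.Int.toStr (m.count c)) := by
  intro n
  induction n with
  | zero =>
      intro m hm _
      have h0 : m = [] := List.eq_nil_of_length_eq_zero (Nat.le_zero.1 hm)
      subst h0; simp [counterRuns, PySem.Set.ofList]
  | succ n ih =>
      intro m hm hp
      match m with
      | [] => simp [counterRuns, PySem.Set.ofList]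
      | c :: rest =>
        have htk : ∀ x ∈ rest.takeWhile (· == c), x = c := by
          intro x hx
          exact eq_of_beq (List.mem_takeWhile_imp (p := fun x => x == c) hx)
        have hcle : ∀ x ∈ rest, c ≤ x := (List.pairwise_cons.1 hp).1
        have hprest : rest.Pairwise (· ≤ ·) := (List.pairwise_cons.1 hp).2
        have hpdr : (rest.dropWhile (· == c)).Pairwise (· ≤ ·) :=
          hprest.sublist (List.dropWhile_sublist _)
        have hdr : c ∉ rest.dropWhile (· == c) := pv_not_mem_dropWhile c rest hprest hcle
        have hrest : rest.takeWhile (· == c) ++ rest.dropWhile (· == c) = rest :=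
          List.takeWhile_append_dropWhile
        have hcount : ((c :: rest).count c : Int)
            = 1 + ((rest.takeWhile (· == c)).length : Int) := by
          have h1 : (c :: rest).count c = rest.count c + 1 := List.count_cons_self
          have h2 : rest.count c
              = (rest.takeWhile (· == c)).count c + (rest.dropWhile (· == c)).count c := by
            rw [← List.count_append, hrest]
          have h3 : (rest.takeWhile (· == c)).count c = (rest.takeWhile (· == c)).length := by
            rw [List.count_eq_length]; intro b hb; exact (htk b hb).symm
          have h4 : (rest.dropWhile (· == c)).count c = 0 := List.count_eq_zero.2 hdr
          rw [h1, h2, h3, h4]; push_cast; ring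
        have hof : PySem.Set.ofList (c :: rest)
            = c :: PySem.Set.ofList (rest.dropWhile (· == c)) := by
          conv_lhs => rw [← hrest]
          exact pv_ofList_run c _ _ htk hdr
        have hlen : (rest.dropWhile (· == c)).length ≤ n := by
          have h1 : (rest.dropWhile (· == c)).length ≤ rest.length :=
            List.length_dropWhile_le _ _
          have h2 : rest.length ≤ n := by simpa [Nat.succ_le_succ_iff] using hm
          exact h1.trans h2
        rw [counterRuns, hof]
        simp only [List.map_cons]
        refine congrArg₂ List.cons ?_ ?_
        · rw [hcount]
        · rw [ih _ hlen hpdr]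
          apply List.map_congr_left
          intro x hx
          have hxdr : x ∈ rest.dropWhile (· == c) := by
            simpa only [PySem.Set.mem_ofList] using hx
          have hxc : x ≠ c := by intro h; exact hdr (h ▸ hxdr)
          have hcx : (c :: rest).count x = (rest.dropWhile (· == c)).count x := by
            rw [List.count_cons_of_ne (Ne.symm hxc)]
            conv_lhs => rw [← hrest]
            rw [List.count_append]
            have h5 : (rest.takeWhile (· == c)).count x = 0 := by
              rw [List.count_eq_zero]
              intro hxtk; exact hxc (htk x hxtk)
            omega
          rw [hcx]

-- "''.join" over a cons
lemma pv_join_cons (p : String) (ps : List String) :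
    PySem.Str.join "" (p :: ps) = p ++ PySem.Str.join "" ps := by
  cases ps with
  | nil => simp [PySem.Str.join, PySem.Chars.join, List.intercalate]
  | cons q qs => simp [PySem.Str.join, PySem.Chars.join_cons_cons]

-- the accumulating output loop of A is a join of per-key pieces
lemma pv_strfold (ks : List Char) (f : Char → String) (acc : String) :
    ks.foldl (fun o k => (o ++ String.ofList [k]) ++ f k) acc
      = acc ++ PySem.Str.join "" (ks.map (fun k => String.ofList [k] ++ f k)) := by
  induction ks generalizing acc with
  | nil => simp [PySem.Str.join, PySem.Chars.join, List.intercalate]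
  | cons k ks ih =>
      rw [List.foldl_cons, ih, List.map_cons, pv_join_cons]
      simp [String.append_assoc]

-- ===== VERDICT (by name: the statement is the Claim_ definition above) =====
theorem counter_spec : Claim_equal_counter := by
  intro s _
  unfold Spec_counter counter counter_alt
  simp only [pv_fold_eq_counter, PySem.Dict.keys_counter]
  set l := s.toList with hl
  set ks := PySem.List.sorted (PySem.Set.ofList l) (fun k => k) with hks
  have hksnodup : ks.Nodup :=
    ((PySem.List.sorted_perm (PySem.Set.ofList l) (fun k => k) false).nodup_iff).2
      (PySem.Set.nodup_ofList l)
  have hitems :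
      ((ks.foldl (fun d k => d.insert k ((PySem.Dict.counter l).getD k 0)) PySem.Dict.empty).items)
        = ks.map (fun k => (k, (PySem.Dict.counter l).getD k 0)) := by
    have := PySem.Dict.items_foldl_insert_fresh (l := ks) (k := fun k => k)
      (v := fun k => (PySem.Dict.counter l).getD k 0) (d := PySem.Dict.empty)
      (by intro a _; simp [PySem.Dict.contains_empty]) (by simpa using hksnodup)
    simpa using this
  set d2 := ks.foldl (fun d k => d.insert k ((PySem.Dict.counter l).getD k 0)) PySem.Dict.empty with hd2
  have hkeys : d2.keys = ks := by
    show d2.items.map (·.1) = ks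
    rw [hitems, List.map_map]
    simp [Function.comp_def]
  have hkeysnodup : d2.keys.Nodup := by rw [hkeys]; exact hksnodup
  have hgetD : ∀ k ∈ ks, d2.getD k 0 = (l.count k : Int) := by
    intro k hk
    have hmem : (k, (PySem.Dict.counter l).getD k 0) ∈ d2.items := by
      rw [hitems]; exact List.mem_map_of_mem hk
    rw [PySem.Dict.getD_of_mem_items d2 hmem hkeysnodup 0, PySem.Dict.getD_counter]
  rw [hkeys]
  rw [PySem.List.foldl_congr_mem ks _
    (fun o k => (o ++ String.ofList [k]) ++ PySem.Int.toStr ((l.count k : Int))) ""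
    (by intro acc x hx; rw [hgetD x hx])]
  rw [pv_strfold ks (fun k => PySem.Int.toStr ((l.count k : Int))) ""]
  have hsl : (PySem.List.sorted l (fun c : Char => c)).Pairwise (· ≤ ·) :=
    PySem.List.sorted_pairwise l (fun c => c)
  rw [pv_counterRuns_sorted (PySem.List.sorted l (fun c => c)).length _ le_rfl hsl]
  rw [hks, pv_sorted_ofList l]
  have hcnt : ∀ c : Char,
      ((PySem.List.sorted l (fun c : Char => c)).count c : Int) = (l.count c : Int) := by
    intro c
    have h6 := (PySem.List.sorted_perm l (fun c : Char => c) false).count_eq c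
    exact_mod_cast h6
  have hmap :
      (PySem.Set.ofList (PySem.List.sorted l (fun c => c))).map
          (fun c => String.ofList [c]
            ++ PySem.Int.toStr ((PySem.List.sorted l (fun c : Char => c)).count c))
        = (PySem.Set.ofList (PySem.List.sorted l (fun c => c))).map
          (fun k => String.ofList [k] ++ PySem.Int.toStr ((l.count k : Int))) := by
    apply List.map_congr_left
    intro x _
    rw [hcnt x]
  rw [hmap]
  simp
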